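-- pv_equiv track=rewrite | github.com/Inveterate-Enthusiast/LeetCode | Python/2148. Count Elements With Strictly Smaller and Greater Elements.py | countElements
-- ===== SOURCE A (Python) =====
-- from typing import List
-- from collections import defaultdict
--
-- def countElements(nums: List[int]) -> int:
--     our_dict = defaultdict(int)
--     our_min, our_max = float("inf"), float("-inf")
--
--     for num in nums:
--         our_dict[num] += 1
--         if num > our_max: our_max = num
--         if num < our_min: our_min = num
--
--     result = 0
--     for num, freq in our_dict.items():
--         if num != our_min and num != our_max:
--             result += freq
--
--     return result
--
-- nums = [-71,-71,93,-71,40]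
-- ===== SOURCE B (Python) =====
-- from typing import List
--
-- def countElements(nums: List[int]) -> int:
--     s = sorted(nums)
--     if not s:
--         return 0
--     lo, hi = s[0], s[-1]
--     return sum(1 for x in s if lo < x < hi)
-- ===== Notes on version B (the rewrite author's own statement) =====
-- stated objective: alternative
-- what changed: B sorts the list, reads the extremes as the sorted endpoints, and counts the elements strictly between them with one comparison-filtered pass; A's frequency defaultdict, running min/max and summation over dict items all disappear.
import Mathlib
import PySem

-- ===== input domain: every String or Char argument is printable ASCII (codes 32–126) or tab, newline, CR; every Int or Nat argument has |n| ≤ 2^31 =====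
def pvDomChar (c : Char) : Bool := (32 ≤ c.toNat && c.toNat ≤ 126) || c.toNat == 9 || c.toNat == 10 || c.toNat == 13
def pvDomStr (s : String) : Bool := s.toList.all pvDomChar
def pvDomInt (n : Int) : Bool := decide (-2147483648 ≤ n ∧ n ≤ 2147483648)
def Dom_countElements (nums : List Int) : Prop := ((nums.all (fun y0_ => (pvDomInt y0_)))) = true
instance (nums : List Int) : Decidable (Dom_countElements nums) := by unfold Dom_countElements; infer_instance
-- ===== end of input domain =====

-- B sorts the list, reads the extremes as the sorted endpoints and counts the elements strictly
-- between them in one filtered pass; A's frequency dict and running min/max disappear (alternative).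

-- ===== PORT A =====
-- our_min / our_max start at float("+inf") / float("-inf"); ported as Option Int with none = the
-- infinite sentinel (exact: the sentinels compare greater/less than every int, and when the list
-- is empty the dict is empty, so the sentinels are never compared against a key).
def countElements (nums : List Int) : Int :=
  let st := nums.foldl
    (fun (st : PySem.Dict Int Int × Option Int × Option Int) num =>
      let d := st.1.modify num 0 (· + 1)
      let mx := match st.2.2 with
        | none => some num
        | some m => if num > m then some num else st.2.2
      let mn := match st.2.1 with
        | none => some num
        | some m => if num < m then some num else st.2.1
      (d, mn, mx))
    (PySem.Dict.empty, none, none)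
  st.1.items.foldl
    (fun result p => if some p.1 ≠ st.2.1 ∧ some p.1 ≠ st.2.2 then result + p.2 else result) 0

-- ===== PORT B =====
def countElements_alt (nums : List Int) : Int :=
  let s := PySem.List.sorted nums (fun y => y) false
  if s = [] then 0
  else
    match PySem.List.pyGet? s 0, PySem.List.pyGet? s (-1) with
    | some lo, some hi => s.foldl (fun acc x => if lo < x ∧ x < hi then acc + 1 else acc) 0
    | _, _ => 0  -- unreachable: s is nonempty

-- ===== PRECONDITION & SPEC =====
def Spec_countElements (nums : List Int) (out : Int) : Prop := out = countElements_alt nums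
instance (nums : List Int) (out : Int) : Decidable (Spec_countElements nums out) := by unfold Spec_countElements; infer_instance

-- ===== CLAIM (what is proved, stated in full; the proofs are below) =====
def Claim_equal_countElements : Prop := ∀ (nums : List Int), Dom_countElements nums → Spec_countElements nums (countElements nums)

-- ===== LEMMAS AND PROOFS =====

-- names for the independent components of A's fold (proof-side only)
def pvMinStep (o : Option Int) (num : Int) : Option Int :=
  match o with
  | none => some num
  | some m => if num < m then some num else o

def pvMaxStep (o : Option Int) (num : Int) : Option Int :=
  match o with
  | none => some num
  | some m => if num > m then some num else o

-- the three components of A's fold are independent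
theorem pv_fold_split (l : List Int) (d : PySem.Dict Int Int) (mn0 mx0 : Option Int) :
    l.foldl
      (fun (st : PySem.Dict Int Int × Option Int × Option Int) num =>
        let d := st.1.modify num 0 (· + 1)
        let mx := match st.2.2 with
          | none => some num
          | some m => if num > m then some num else st.2.2
        let mn := match st.2.1 with
          | none => some num
          | some m => if num < m then some num else st.2.1
        (d, mn, mx)) (d, mn0, mx0)
    = (l.foldl (fun d x => d.modify x 0 (· + 1)) d,
       l.foldl pvMinStep mn0, l.foldl pvMaxStep mx0) := by
  induction l generalizing d mn0 mx0 with
  | nil => rfl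
  | cons x t ih =>
      simp only [List.foldl_cons]
      rw [ih]
      rfl

theorem pvMinStep_some (m x : Int) : pvMinStep (some m) x = some (min m x) := by
  show (if x < m then some x else some m) = some (min m x)
  split_ifs with h <;> congr 1 <;> omega

theorem pvMaxStep_some (m x : Int) : pvMaxStep (some m) x = some (max m x) := by
  show (if x > m then some x else some m) = some (max m x)
  split_ifs with h <;> congr 1 <;> omega

theorem pv_min_fold_some (t : List Int) (m : Int) :
    t.foldl pvMinStep (some m) = some (t.foldl min m) := by
  induction t generalizing m with
  | nil => rfl
  | cons x t ih => rw [List.foldl_cons, pvMinStep_some, ih, List.foldl_cons]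

theorem pv_max_fold_some (t : List Int) (m : Int) :
    t.foldl pvMaxStep (some m) = some (t.foldl max m) := by
  induction t generalizing m with
  | nil => rfl
  | cons x t ih => rw [List.foldl_cons, pvMaxStep_some, ih, List.foldl_cons]

-- in a ≤-sorted list every member is at most the last element
theorem pv_le_getLast? (l : List Int) (hp : l.Pairwise (· ≤ ·))
    (y : Int) (hy : y ∈ l) (z : Int) (hz : l.getLast? = some z) : y ≤ z := by
  induction l with
  | nil => cases hy
  | cons x t ih =>
      cases hxt : t with
      | nil =>
          subst hxt
          simp_all
      | cons a b =>
          subst hxt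
          rw [List.getLast?_cons_cons] at hz
          have hzmem : z ∈ a :: b := List.mem_of_getLast? hz
          rcases List.mem_cons.mp hy with rfl | hyt
          · exact (List.pairwise_cons.mp hp).1 z hzmem
          · exact ih (List.pairwise_cons.mp hp).2 hyt hz

-- Σ over a nodup list of (if k = v then 1 else 0) = 1 when v is a member
theorem pv_sum_ite_one (L : List Int) (hnd : L.Nodup) (v : Int) (hv : v ∈ L) :
    (L.map (fun k => if k = v then (1 : Int) else 0)).sum = 1 := by
  induction L with
  | nil => cases hv
  | cons x t ih =>
      simp only [List.map_cons, List.sum_cons]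
      rcases List.mem_cons.mp hv with h | h
      · subst h
        have hz : (t.map (fun k => if k = v then (1 : Int) else 0)).sum = 0 := by
          apply List.sum_eq_zero
          intro y hy
          rcases List.mem_map.mp hy with ⟨k, hk, rfl⟩
          have hne : k ≠ v := fun e => (List.nodup_cons.mp hnd).1 (e ▸ hk)
          simp [hne]
        rw [hz, if_pos rfl]; ring
      · have hx : x ≠ v := fun e => (List.nodup_cons.mp hnd).1 (e ▸ h)
        rw [if_neg hx, ih (List.nodup_cons.mp hnd).2 h]
        ring

-- a sum of counts over a nodup list containing all elements of l is l.length
theorem pv_sum_count_sub (l L : List Int) (hnd : L.Nodup) (hsub : ∀ y ∈ l, y ∈ L) :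
    (L.map (fun k => (l.count k : Int))).sum = (l.length : Int) := by
  induction l with
  | nil => simp
  | cons x t ih =>
      have hx : x ∈ L := hsub x (List.mem_cons_self)
      have hsub' : ∀ y ∈ t, y ∈ L := fun y hy => hsub y (List.mem_cons_of_mem _ hy)
      have hstep : (L.map (fun k => ((x :: t).count k : Int))).sum
          = (L.map (fun k => (t.count k : Int))).sum
            + (L.map (fun k => if k = x then (1 : Int) else 0)).sum := by
        rw [← PySem.List.sum_map_add_int]
        apply congrArg
        apply List.map_congr_left
        intro k _
        by_cases hkx : k = x
        · subst hkx; simp [List.count_cons_self]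
        · have hxk : ¬ x = k := fun e => hkx e.symm
          simp [hxk, hkx]
      rw [hstep, ih hsub', pv_sum_ite_one L hnd x hx]
      simp only [List.length_cons]
      push_cast
      ring

-- a sum of (if p k then count k else 0) over the distinct elements is a countP of l
theorem pv_sum_if_count (l : List Int) (p : Int → Prop) [DecidablePred p] :
    ((PySem.Set.ofList l).map (fun k => if p k then (l.count k : Int) else 0)).sum
      = ((l.countP (fun k => decide (p k))) : Int) := by
  have hmap : ∀ k, (if p k then (l.count k : Int) else 0)
      = ((l.filter (fun k => decide (p k))).count k : Int) := by
    intro k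
    by_cases hk : p k
    · rw [List.count_filter (by simp [hk]), if_pos hk]
    · rw [if_neg hk, List.count_eq_zero.mpr]
      · simp
      · intro hmem
        exact hk (by simpa using (List.mem_filter.mp hmem).2)
  rw [List.map_congr_left (fun k _ => hmap k),
    pv_sum_count_sub _ _ (PySem.Set.nodup_ofList l)
      (fun y hy => (PySem.Set.mem_ofList l y).mpr (List.mem_of_mem_filter hy)),
    List.countP_eq_length_filter]

-- A's items-fold as a sum over the distinct keys (specific to A's final loop)
theorem pv_items_fold (L : List Int) (mn mx : Int) (f : Int → Int) (a : Int) :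
    L.foldl (fun result k => if ¬(k = mn) ∧ ¬(k = mx) then result + f k else result) a
      = a + (L.map (fun k => if ¬(k = mn) ∧ ¬(k = mx) then f k else 0)).sum := by
  induction L generalizing a with
  | nil => simp
  | cons y ys ih =>
      simp only [List.foldl_cons, List.map_cons, List.sum_cons, ih]
      by_cases h : ¬(y = mn) ∧ ¬(y = mx)
      · rw [if_pos h, if_pos h]; ring
      · rw [if_neg h, if_neg h]; ring

-- ===== VERDICT =====
theorem countElements_spec : Claim_equal_countElements := by
  unfold Claim_equal_countElements Spec_countElements
  intro nums _
  cases hn : nums with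
  | nil => rfl
  | cons x t =>
  rw [← hn]
  have hne : nums ≠ [] := by simp [hn]
  -- A's running min / max are min(nums) / max(nums)
  have hmnf : nums.foldl pvMinStep none = some (t.foldl min x) := by
    rw [hn, List.foldl_cons]; exact pv_min_fold_some t x
  have hmxf : nums.foldl pvMaxStep none = some (t.foldl max x) := by
    rw [hn, List.foldl_cons]; exact pv_max_fold_some t x
  have hmin : PySem.List.min? nums (fun y => y) = some (t.foldl min x) := by
    rw [hn, PySem.List.min?_id_cons]
  have hmax : PySem.List.max? nums (fun y => y) = some (t.foldl max x) := by
    rw [hn, PySem.List.max?_id_cons]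
  set mn := t.foldl min x with hmn
  set mx := t.foldl max x with hmx
  have hmnmem : mn ∈ nums := PySem.List.min?_mem hmin
  have hmxmem : mx ∈ nums := PySem.List.max?_mem hmax
  have hmnle : ∀ y ∈ nums, mn ≤ y := by
    intro y hy; simpa using PySem.List.min?_isMin hmin y hy
  have hmxge : ∀ y ∈ nums, y ≤ mx := by
    intro y hy; simpa using PySem.List.max?_isMax hmax y hy
  have hcnt : nums.foldl (fun d x => d.modify x 0 (· + 1)) PySem.Dict.empty
      = PySem.Dict.counter nums := (PySem.Dict.counter_eq_foldl nums).symm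
  -- A = countP (k ≠ mn ∧ k ≠ mx) nums
  have hA : countElements nums
      = ((nums.countP (fun k => decide (¬(k = mn) ∧ ¬(k = mx)))) : Int) := by
    simp only [countElements, pv_fold_split, hmnf, hmxf, hcnt, PySem.Dict.items_counter,
      List.foldl_map, ne_eq, Option.some.injEq]
    rw [pv_items_fold, pv_sum_if_count nums (fun k => ¬(k = mn) ∧ ¬(k = mx))]
    ring
  -- B = countP (mn < x ∧ x < mx) nums
  have hB : countElements_alt nums
      = ((nums.countP (fun y => decide (mn < y ∧ y < mx))) : Int) := by
    have hsne : PySem.List.sorted nums (fun y => y) false ≠ [] := by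
      rw [ne_eq, PySem.List.sorted_eq_nil_iff]; exact hne
    cases hsc : PySem.List.sorted nums (fun y => y) false with
    | nil => exact absurd hsc hsne
    | cons lo rest =>
    have hBdef : countElements_alt nums
        = (if PySem.List.sorted nums (fun y => y) false = [] then 0
           else match PySem.List.pyGet? (PySem.List.sorted nums (fun y => y) false) 0,
                      PySem.List.pyGet? (PySem.List.sorted nums (fun y => y) false) (-1) with
                | some lo, some hi =>
                    (PySem.List.sorted nums (fun y => y) false).foldl
                      (fun acc x => if lo < x ∧ x < hi then acc + 1 else acc) 0
                | _, _ => 0) := rfl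
    have hpair : (lo :: rest).Pairwise (fun a b : Int => a ≤ b) := by
      rw [← hsc]; exact PySem.List.sorted_pairwise nums (fun y => y)
    have hperm : (lo :: rest).Perm nums := by
      rw [← hsc]; exact PySem.List.sorted_perm nums (fun y => y) false
    have hcne : (lo :: rest) ≠ ([] : List Int) := List.cons_ne_nil lo rest
    have hgetLast : PySem.List.pyGet? (lo :: rest) (-1)
        = some ((lo :: rest).getLast hcne) := by
      rw [PySem.List.pyGet?_neg_one]; exact List.getLast?_eq_some_getLast hcne
    set hi := (lo :: rest).getLast hcne with hhi
    -- lo = mn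
    have hlomem : lo ∈ nums := hperm.mem_iff.mp List.mem_cons_self
    have hlole : ∀ y ∈ (lo :: rest), lo ≤ y := by
      intro y hy
      rcases List.mem_cons.mp hy with rfl | hyt
      · exact le_refl y
      · exact (List.pairwise_cons.mp hpair).1 y hyt
    have hlo : lo = mn :=
      le_antisymm (hperm.mem_iff.mpr hmnmem |> hlole mn) (hmnle lo hlomem)
    -- hi = mx
    have hhimem : hi ∈ nums := hperm.mem_iff.mp (List.getLast_mem hcne)
    have hhige : ∀ y ∈ nums, y ≤ hi := by
      intro y hy
      exact pv_le_getLast? (lo :: rest) hpair y (hperm.mem_iff.mpr hy) hi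
        (List.getLast?_eq_some_getLast hcne)
    have hhi' : hi = mx := le_antisymm (hmxge hi hhimem) (hhige mx hmxmem)
    rw [hBdef, hsc, if_neg hcne, PySem.List.pyGet?_zero_cons, hgetLast]
    have hfun : (fun (acc : Int) y => if lo < y ∧ y < hi then acc + 1 else acc)
        = (fun (acc : Int) y => if (fun y => decide (lo < y ∧ y < hi)) y = true then acc + 1 else acc) := by
      funext acc y; simp
    show (lo :: rest).foldl (fun acc y => if lo < y ∧ y < hi then acc + 1 else acc) 0 = _
    rw [hfun, PySem.List.foldl_count_if, hperm.countP_eq, hlo, hhi']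
    ring
  rw [hA, hB]
  congr 1
  apply List.countP_congr
  intro y hy
  have h1 := hmnle y hy
  have h2 := hmxge y hy
  constructor <;> intro h <;> simp_all <;> omega
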